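-- pv_equiv track=rewrite | github.com/emorynlp/seq2seq-corenlp | elit/components/seq2seq/dep/dep_utility.py | _dfs
-- ===== SOURCE A (Python) =====
-- from typing import List
--
-- LB = '['
--
-- RB = ']'
--
-- def _dfs(root, tokens, tree, buffer: List):
--     for child, rel in tree[root].items():
--         buffer.append(f':{rel}')
--         buffer.append(LB)
--         buffer.append(tokens[child])
--         _dfs(child, tokens, tree, buffer)
--         buffer.append(RB)
--     return buffer
-- ===== SOURCE B (Python) =====
-- from typing import List
--
-- LB = '['
--
-- RB = ']'
--
-- def _dfs(root, tokens, tree, buffer: List):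
--     stack = [iter(tree[root].items())]
--     while stack:
--         step = next(stack[-1], None)
--         if step is None:
--             stack.pop()
--             if stack:
--                 buffer.append(RB)
--         else:
--             child, rel = step
--             buffer.append(f':{rel}')
--             buffer.append(LB)
--             buffer.append(tokens[child])
--             stack.append(iter(tree[child].items()))
--     return buffer
-- ===== Notes on version B (the rewrite author's own statement) =====
-- stated objective: alternative
-- what changed: The recursion is replaced by an iterative loop over an explicit stack of child iterators: one frame per open node, ']' emitted when a non-root frame's iterator is exhausted.
import Mathlib
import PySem

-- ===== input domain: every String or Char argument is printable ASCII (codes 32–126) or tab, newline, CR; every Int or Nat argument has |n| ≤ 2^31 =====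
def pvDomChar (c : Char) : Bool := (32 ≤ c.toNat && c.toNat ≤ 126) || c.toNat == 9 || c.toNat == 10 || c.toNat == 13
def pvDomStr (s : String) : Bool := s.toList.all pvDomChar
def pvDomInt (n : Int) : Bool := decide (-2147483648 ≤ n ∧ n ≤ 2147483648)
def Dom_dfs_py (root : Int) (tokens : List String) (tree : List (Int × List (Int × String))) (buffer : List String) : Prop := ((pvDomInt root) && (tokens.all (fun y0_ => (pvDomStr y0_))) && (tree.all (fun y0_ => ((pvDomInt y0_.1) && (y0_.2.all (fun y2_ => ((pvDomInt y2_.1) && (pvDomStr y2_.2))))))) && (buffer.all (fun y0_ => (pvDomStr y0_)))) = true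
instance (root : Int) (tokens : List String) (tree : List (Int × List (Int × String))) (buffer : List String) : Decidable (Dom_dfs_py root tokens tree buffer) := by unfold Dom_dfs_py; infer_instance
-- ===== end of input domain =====

-- B replaces A's recursion by an iterative loop over an explicit stack of per-node child
-- iterators (']' emitted when a non-root frame is exhausted); same tokens in the same order.
-- Like A, B mutates the buffer in place; the equivalence proved here is about the return value.

-- dict first-match lookup tree[k] (none = KeyError)
def pvLook (tree : List (Int × List (Int × String))) (k : Int) : Option (List (Int × String)) :=
  match tree with
  | [] => none
  | (a, v) :: rest => if a == k then some v else pvLook rest k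

-- ===== PORT A =====
-- fuel makes the recursion total; none = exception or fuel exhausted (only outside Pre_)
mutual
def dfsA : Nat → Int → List String → List (Int × List (Int × String)) → List String → Option (List String)
  | 0, _, _, _, _ => none
  | f+1, root, tokens, tree, buffer =>
    match pvLook tree root with
    | none => none                      -- KeyError: tree[root]
    | some adj => goA f tokens tree adj buffer
  termination_by f _ _ _ _ => (f, 0)
def goA : Nat → List String → List (Int × List (Int × String)) → List (Int × String) → List String → Option (List String)
  | _, _, _, [], buffer => some buffer
  | f, tokens, tree, (child, rel) :: rest, buffer =>
    match PySem.List.pyGet? tokens child with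
    | none => none                      -- IndexError: tokens[child]
    | some tok =>
      match dfsA f child tokens tree (buffer ++ [":" ++ rel, "[", tok]) with
      | none => none
      | some b => goA f tokens tree rest (b ++ ["]"])
  termination_by f _ _ adj _ => (f, adj.length + 1)
end

def dfs_py (root : Int) (tokens : List String) (tree : List (Int × List (Int × String))) (buffer : List String) : List String :=
  (dfsA (tree.length + 1) root tokens tree buffer).getD buffer

-- ===== PORT B =====
-- total number of edge entries in the tree (used only by the termination measure of runB)
def pvTot (tree : List (Int × List (Int × String))) : Nat :=
  (tree.map (fun p => p.2.length)).sum

theorem pvLook_length (tree : List (Int × List (Int × String))) (k : Int)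
    (adj : List (Int × String)) (h : pvLook tree k = some adj) : adj.length ≤ pvTot tree := by
  induction tree with
  | nil => simp [pvLook] at h
  | cons p rest ih =>
    obtain ⟨a, v⟩ := p
    simp only [pvLook] at h
    simp only [pvTot, List.map_cons, List.sum_cons]
    split at h
    · cases h; omega
    · have := ih h; simp only [pvTot] at this; omega

-- termination measure for the stack machine: frames weighted exponentially in their fuel
def pvMu (tree : List (Int × List (Int × String))) : List (Nat × List (Int × String)) → Nat
  | [] => 0
  | (f, items) :: rest => (items.length + 1) * (pvTot tree + 2) ^ f + pvMu tree rest

-- B's loop: stack of frames, each the not-yet-visited children of an open node.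
-- The per-frame fuel is a ghost totalization device (B's Python has no fuel and diverges on
-- cyclic input, like A); none = exception or fuel exhausted (only outside Pre_).
def runB (tokens : List String) (tree : List (Int × List (Int × String))) :
    List (Nat × List (Int × String)) → List String → Option (List String)
  | [], buffer => some buffer
  | (f, []) :: rest, buffer =>
      runB tokens tree rest (if rest.isEmpty then buffer else buffer ++ ["]"])
  | (f, (child, rel) :: xs) :: rest, buffer =>
      match PySem.List.pyGet? tokens child with
      | none => none                    -- IndexError: tokens[child]
      | some tok =>
        match f with
        | 0 => none                     -- fuel exhausted
        | f' + 1 =>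
          match hadj : pvLook tree child with
          | none => none                -- KeyError: tree[child]
          | some adj =>
              runB tokens tree ((f', adj) :: (f' + 1, xs) :: rest)
                (buffer ++ [":" ++ rel, "[", tok])
  termination_by stack _ => pvMu tree stack
  decreasing_by
  · have hW : 0 < (pvTot tree + 2) ^ f := pow_pos (by omega) f
    simp only [pvMu, List.length_nil]; omega
  · have hlen := pvLook_length tree child adj hadj
    simp only [pvMu, pow_succ, List.length_cons]
    have hP : 0 < (pvTot tree + 2) ^ f' := pow_pos (by omega) f'
    have h1 : (adj.length + 1) * (pvTot tree + 2) ^ f' < (pvTot tree + 2) ^ f' * (pvTot tree + 2) := by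
      calc (adj.length + 1) * (pvTot tree + 2) ^ f' < (pvTot tree + 2) * (pvTot tree + 2) ^ f' :=
            Nat.mul_lt_mul_of_pos_right (by omega) hP
        _ = (pvTot tree + 2) ^ f' * (pvTot tree + 2) := Nat.mul_comm _ _
    nlinarith [h1]

def dfs_py_alt (root : Int) (tokens : List String) (tree : List (Int × List (Int × String))) (buffer : List String) : List String :=
  match pvLook tree root with
  | none => buffer
  | some adj0 => (runB tokens tree [(tree.length, adj0)] buffer).getD buffer

-- ===== PRECONDITION & SPEC =====
-- children of node k in the input graph (first-match lookup, like dict)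
def pvChildren (tree : List (Int × List (Int × String))) (k : Int) : List Int :=
  ((pvLook tree k).getD []).map Prod.fst

-- one closure round: add every member's children
def pvStep (tree : List (Int × List (Int × String))) (s : PySem.Set Int) : PySem.Set Int :=
  s.foldl (fun acc k => PySem.Set.update acc (pvChildren tree k)) s

-- nodes of the input graph reachable from the members of s (tree.length+1 rounds saturate:
-- any reachable node lies within that distance, going through distinct keys)
def pvReach (tree : List (Int × List (Int × String))) : Nat → PySem.Set Int → PySem.Set Int
  | 0, s => s
  | n+1, s => pvReach tree n (pvStep tree s)

-- Pre_ = exactly the inputs on which A returns: every node reachable from root is a key of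
-- tree, every edge from a reachable node carries a valid Python index into tokens, and no
-- reachable node lies on a cycle (otherwise A recurses forever). These are input-graph
-- properties (reachability/acyclicity), stated via the bounded closure pvReach.
def Pre_dfs_py (root : Int) (tokens : List String) (tree : List (Int × List (Int × String))) (buffer : List String) : Prop :=
  ∀ k ∈ pvReach tree (tree.length + 1) (PySem.Set.ofList [root]),
    k ∈ tree.map Prod.fst ∧
    (∀ e ∈ (pvLook tree k).getD [], PySem.Raise.InRange tokens.length e.1) ∧
    k ∉ pvReach tree (tree.length + 1) (PySem.Set.ofList (pvChildren tree k))
instance (root : Int) (tokens : List String) (tree : List (Int × List (Int × String))) (buffer : List String) : Decidable (Pre_dfs_py root tokens tree buffer) := by unfold Pre_dfs_py; infer_instance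

def pvWitness_dfs_py : Int × List String × (List (Int × List (Int × String))) × List String :=
  (0, ["a", "b", "c"], [(0, [(1, "nsubj"), (2, "obj")]), (1, []), (2, [])], ["root"])

def Spec_dfs_py (root : Int) (tokens : List String) (tree : List (Int × List (Int × String))) (buffer : List String) (out : List String) : Prop := out = dfs_py_alt root tokens tree buffer
instance (root : Int) (tokens : List String) (tree : List (Int × List (Int × String))) (buffer : List String) (out : List String) : Decidable (Spec_dfs_py root tokens tree buffer out) := by unfold Spec_dfs_py; infer_instance

-- ===== CLAIM (what is proved, stated in full; the proofs are below) =====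
def Claim_equal_dfs_py : Prop := ∀ (root : Int) (tokens : List String) (tree : List (Int × List (Int × String))) (buffer : List String), Dom_dfs_py root tokens tree buffer → Pre_dfs_py root tokens tree buffer → Spec_dfs_py root tokens tree buffer (dfs_py root tokens tree buffer)

-- ===== LEMMAS AND PROOFS =====

-- the stack machine run from a frame (f, adj) computes goA f adj, then closes the frame
-- (emits "]" unless it is the root frame) and continues with the rest of the stack
theorem runB_goA (tokens : List String) (tree : List (Int × List (Int × String))) :
    ∀ (f : Nat) (adj : List (Int × String)) (rest : List (Nat × List (Int × String))) (buf : List String),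
      runB tokens tree ((f, adj) :: rest) buf =
        (goA f tokens tree adj buf).bind
          (fun b => runB tokens tree rest (if rest.isEmpty then b else b ++ ["]"])) := by
  intro f
  induction f with
  | zero =>
    intro adj rest buffer
    cases adj with
    | nil => simp [runB, goA]
    | cons e xs =>
      obtain ⟨c, rel⟩ := e
      simp only [runB, goA]
      cases PySem.List.pyGet? tokens c <;> simp [dfsA]
  | succ f ih =>
    intro adj rest buffer
    induction adj generalizing buffer with
    | nil => simp [runB, goA]
    | cons e xs ihxs =>
      obtain ⟨c, rel⟩ := e
      simp only [runB, goA]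
      cases hg : PySem.List.pyGet? tokens c with
      | none => simp
      | some tok =>
        simp only [dfsA]
        cases hl : pvLook tree c with
        | none => simp
        | some adj' =>
          simp only
          rw [ih adj' ((f + 1, xs) :: rest) (buffer ++ [":" ++ rel, "[", tok])]
          cases hga : goA f tokens tree adj' (buffer ++ [":" ++ rel, "[", tok]) with
          | none => simp
          | some b =>
            simp only [Option.bind_some, List.isEmpty_cons, Bool.false_eq_true, if_false]
            rw [ihxs (b ++ ["]"])]

theorem dfs_py_eq_alt (root : Int) (tokens : List String)
    (tree : List (Int × List (Int × String))) (buffer : List String) :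
    dfs_py root tokens tree buffer = dfs_py_alt root tokens tree buffer := by
  unfold dfs_py dfs_py_alt
  simp only [dfsA]
  cases pvLook tree root with
  | none => rfl
  | some adj0 =>
    simp only
    rw [runB_goA]
    cases goA tree.length tokens tree adj0 buffer <;> simp [runB]

-- ===== VERDICT (by name: the statement is the Claim_ definition above) =====
theorem dfs_py_spec : Claim_equal_dfs_py := by
  intro root tokens tree buffer _ _
  unfold Spec_dfs_py
  exact dfs_py_eq_alt root tokens tree buffer
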